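-- pv_equiv track=rewrite | github.com/chryd/Comp202 | Assignment3/file_processing.py | get_word_breakdown
-- ===== SOURCE A (Python) =====
-- def get_sentences(t):
--     '''(str) -> list
--
--     Given a string, returns a list of strings each representing one of the sentences from
--     the input string.
--
--     >>> text = "This is the first sentence. This is the second one."
--     >>> get_sentences(text)
--     ['This is the first sentence', 'This is the second one']
--
--     >>> t = "What?! No way! I can't believe it."
--     >>> get_sentences(t)
--     ['What', 'No way', "I can't believe it"]
--
--     >>> t = "She felt a presence behind her. Was it her imagination? It must be..."
--     >>> get_sentences(t)
--     ['She felt a presence behind her', 'Was it her imagination', 'It must be']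
--
--     >>> t = "Oh, no! I made a typo,"
--     >>> get_sentences(t)
--     ['Oh, no', 'I made a typo,']
--     '''
--     for i in range(len(t)):
--         #if i is in the range, and there is a punctuation followed by a space
--         if (i < len(t) - 1) and ((t[i] + t[i + 1]) in ('. ', '! ', '? ')):
--             #the characters is replaced by .. (to avoid index error)
--             t = t.replace(t[i] + t[i + 1], "..")
--         elif t[i] in '!?': #else, punctuation different from '.' are transformed into '.'
--             t = t.replace(t[i], ".")
--
--     #split the text into a list of words seperated at .
--     sentence_list = t.split(".")
--
--     #empty list are added when 2 punctuations are following each other (... or ?! for instance)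
--     #removing all empty strings
--     for i in range(sentence_list.count('')):
--         sentence_list.remove('')
--
--     return sentence_list
--
-- def get_word_breakdown(text):
--     '''(str) -> list
--
--     Given a string returns a 2D lists of strings. Each sublist contains a strings
--     representing words from each sentence.
--
--     >>> text = "This is the first sentence. This is the second one."
--     >>> w = get_word_breakdown(text)
--     >>> w
--     [['this', 'is', 'the', 'first', 'sentence'], ['this', 'is', 'the', 'second', 'one']]
--
--     >>> t = "WHAT?! NO WAY! I can't believe this."
--     >>> get_word_breakdown(t)
--     [['what'], ['no', 'way'], ['i', 'can', 't', 'believe', 'this']]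
--
--     >>> t = "Oh, nO--I MadE a tYpO,"
--     >>> get_word_breakdown(t)
--     [['oh', 'no', 'i', 'made', 'a', 'typo']]
--
--     >>> t = '"Heavens! what a virulent attack!" replied the prince.'
--     >>> get_word_breakdown(t)
--     [['heavens'], ['what', 'a', 'virulent', 'attack'], ['replied', 'the', 'prince']]
--
--     >>> l = "HERE IS A LIST OF RANDOM THINGS: paper; Kat's cat; city; St-Laurent; etc."
--     >>> get_word_breakdown(l)
--     [['here', 'is', 'a', 'list', 'of', 'random', 'things', 'paper', 'kat', 's', 'cat', 'city', 'st', 'laurent', 'etc']]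
--     '''
--     #putting everthing in lower case from the start
--     text = text.lower()
--
--     #the general 2D list
--     word_breakdown = []
--
--     for sentence in get_sentences(text):
--         for char in sentence:
--             #if a punctuation or space marking the end of a word appears
--             if char in (',','-',':',';','"',"'",'\n','\t'):
--                 #replacing all punctuations by spaces
--                 sentence = sentence.replace(char, " ")
--
--         #split the sentence into a list of the words
--         word_in_sentence = sentence.split()
--
--         #when 2 punctuations follow each other, an empty space is added
--         #remove all empty elements
--         for i in range(word_in_sentence.count('')):
--             word_in_sentence.remove('')
--
--         #the list of the words in each sentence is added to the main list
--         word_breakdown.append(word_in_sentence)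
--
--     return word_breakdown
-- ===== SOURCE B (Python) =====
-- # B: single left-to-right pass over the lowercased text with a small state machine,
-- # instead of A's mutate-while-scanning replaces + split + re-split.
-- def get_word_breakdown(text):
--     SEPS = set(" \t\n\r\x0b\x0c,-:;\"'")
--     TERMS = set(".!?")
--     result = []
--     words = []      # words of the current sentence
--     buf = []        # chars of the current word
--     content = False # current sentence piece has at least one character
--     absorb = False  # directly after a terminator: plain spaces join the boundary
--     for c in text.lower():
--         if c in TERMS:
--             if buf:
--                 words.append(''.join(buf))
--                 buf = []
--             if content:
--                 result.append(words)
--                 words = []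
--             content = False
--             absorb = True
--         elif c == ' ' and absorb:
--             pass
--         else:
--             absorb = False
--             content = True
--             if c in SEPS:
--                 if buf:
--                     words.append(''.join(buf))
--                     buf = []
--             else:
--                 buf.append(c)
--     if buf:
--         words.append(''.join(buf))
--     if content:
--         result.append(words)
--     return result
-- ===== Notes on version B (the rewrite author's own statement) =====
-- stated objective: faster
-- what changed: A repeatedly mutates the whole string with global str.replace calls while scanning it, splits it into sentences, then re-scans and re-splits each sentence; B lowercases once and makes a single left-to-right pass with a small state machine (current-word buffer, current-sentence word list, content and absorb flags), never building intermediate strings.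
import Mathlib
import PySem

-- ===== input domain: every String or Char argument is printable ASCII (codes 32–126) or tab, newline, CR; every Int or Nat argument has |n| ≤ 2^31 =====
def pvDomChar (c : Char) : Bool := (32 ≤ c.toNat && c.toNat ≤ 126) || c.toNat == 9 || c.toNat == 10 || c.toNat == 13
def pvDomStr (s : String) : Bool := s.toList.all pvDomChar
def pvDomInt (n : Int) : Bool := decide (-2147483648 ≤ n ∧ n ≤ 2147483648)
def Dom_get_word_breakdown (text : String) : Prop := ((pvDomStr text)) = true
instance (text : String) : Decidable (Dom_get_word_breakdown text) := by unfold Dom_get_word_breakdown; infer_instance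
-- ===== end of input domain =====

-- B replaces A's repeated global string replaces + split + per-sentence re-scan/re-split
-- by a single state-machine pass over the lowercased text; the return values agree on all of Dom.

-- ===== PORT A =====
-- body of get_sentences' scanning loop: one iteration, on the current string
def pvSentStep (t : List Char) (i : Int) : List Char :=
  if i < PySem.List.len t - 1 ∧
      [PySem.List.pyGetD t i ' ', PySem.List.pyGetD t (i + 1) ' '] ∈
        [['.', ' '], ['!', ' '], ['?', ' ']] then
    PySem.Chars.replace t [PySem.List.pyGetD t i ' ', PySem.List.pyGetD t (i + 1) ' '] ['.', '.']
  else if PySem.List.pyGetD t i ' ' ∈ (['!', '?'] : List Char) then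
    PySem.Chars.replace t [PySem.List.pyGetD t i ' '] ['.']
  else t

def pvRemoveLoop {α : Type} [BEq α] (l : List α) (x : α) : List α :=
  (PySem.List.pyRange 0 (PySem.List.count l x) 1).foldl
    (fun l _ => ((PySem.List.remove? l x).getD l)) l

def pvGetSentences (t : List Char) : List (List Char) :=
  pvRemoveLoop
    (PySem.Chars.splitOn ((PySem.List.pyRange 0 (PySem.List.len t) 1).foldl pvSentStep t) ['.']) []

def get_word_breakdown (text : String) : List (List String) :=
  (pvGetSentences (PySem.Chars.lower text.toList)).foldl (fun acc s =>
    acc ++ [pvRemoveLoop ((PySem.Chars.split₀ (s.foldl (fun cur ch =>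
      if ch ∈ ([',', '-', ':', ';', '"', '\'', '\n', '\t'] : List Char) then
        PySem.Chars.replace cur [ch] [' ']
      else cur) s)).map String.ofList) ""]) []

-- ===== PORT B =====
-- automaton state: (result, words of current sentence, current word buffer, content flag, absorb flag)
def pvBStep (st : List (List String) × List String × List Char × Bool × Bool) (c : Char) :
    List (List String) × List String × List Char × Bool × Bool :=
  match st with
  | (res, wd, buf, ct, ab) =>
    if c ∈ (['.', '!', '?'] : List Char) then
      let wd' := if buf.isEmpty then wd else wd ++ [String.ofList buf]
      (if ct then res ++ [wd'] else res, if ct then [] else wd', [], false, true)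
    else if c = ' ' ∧ ab = true then (res, wd, buf, ct, ab)
    else if c ∈ ([' ', '\t', '\n', '\r', '\x0b', '\x0c', ',', '-', ':', ';', '"', '\''] : List Char) then
      (res, if buf.isEmpty then wd else wd ++ [String.ofList buf], [], true, false)
    else (res, wd, buf ++ [c], true, false)

def get_word_breakdown_alt (text : String) : List (List String) :=
  match (PySem.Chars.lower text.toList).foldl pvBStep ([], [], [], false, false) with
  | (res, wd, buf, ct, _) =>
    let wd' := if buf.isEmpty then wd else wd ++ [String.ofList buf]
    if ct then res ++ [wd'] else res

-- ===== PRECONDITION & SPEC =====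
def Spec_get_word_breakdown (text : String) (out : List (List String)) : Prop := out = get_word_breakdown_alt text
instance (text : String) (out : List (List String)) : Decidable (Spec_get_word_breakdown text out) := by unfold Spec_get_word_breakdown; infer_instance

-- ===== CLAIM (what is proved, stated in full; the proofs are below) =====
def Claim_equal_get_word_breakdown : Prop := ∀ (text : String), Dom_get_word_breakdown text → Spec_get_word_breakdown text (get_word_breakdown text)

-- ===== LEMMAS AND PROOFS =====

def pvMyReplace (old new : List Char) (t : List Char) : List Char :=
  if h : old ≠ [] ∧ old.isPrefixOf t then new ++ pvMyReplace old new (t.drop old.length)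
  else
    match t with
    | [] => []
    | c :: t' => c :: pvMyReplace old new t'
termination_by t.length
decreasing_by
  · have hp : old <+: t := List.isPrefixOf_iff_prefix.mp h.2
    have h1 : 0 < old.length := List.length_pos_iff.mpr h.1
    have h2 : old.length ≤ t.length := hp.length_le
    simp only [List.length_drop]; omega
  · simp

theorem pv_myReplace_nil (old new : List Char) : pvMyReplace old new [] = [] := by
  rw [pvMyReplace]
  simp

theorem pv_myReplace_pos (old new t : List Char) (h0 : old ≠ []) (h : old <+: t) :
    pvMyReplace old new t = new ++ pvMyReplace old new (t.drop old.length) := by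
  rw [pvMyReplace]
  rw [dif_pos ⟨h0, List.isPrefixOf_iff_prefix.mpr h⟩]

theorem pv_myReplace_neg (old new : List Char) (c : Char) (t : List Char) (h : ¬ old <+: (c :: t)) :
    pvMyReplace old new (c :: t) = c :: pvMyReplace old new t := by
  rw [pvMyReplace]
  rw [dif_neg (by rintro ⟨-, hp⟩; exact h (List.isPrefixOf_iff_prefix.mp hp))]

theorem pv_replace_go_eq (old new : List Char) (h0 : old ≠ []) :
    ∀ (fuel : ℕ) (l acc : List Char), l.length ≤ fuel →
      PySem.Chars.replace.go old new fuel l acc = acc.reverse ++ pvMyReplace old new l := by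
  intro fuel
  induction fuel with
  | zero =>
    intro l acc hl
    have : l = [] := by cases l <;> simp_all
    subst this
    simp [PySem.Chars.replace.go, pv_myReplace_nil]
  | succ n ih =>
    intro l acc hl
    cases l with
    | nil => simp [PySem.Chars.replace.go, pv_myReplace_nil]
    | cons c t =>
      rw [PySem.Chars.replace.go]
      by_cases hp : old.isPrefixOf (c :: t)
      · rw [if_pos hp]
        have hpre := List.isPrefixOf_iff_prefix.mp hp
        rw [ih _ _ (by have := hpre.length_le; have h1 : 0 < old.length := List.length_pos_iff.mpr h0; simp at hl ⊢; omega)]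
        rw [pv_myReplace_pos old new _ h0 hpre]
        simp
      · rw [if_neg hp]
        rw [ih _ _ (by simp at hl; omega)]
        rw [pv_myReplace_neg old new c t (fun hh => hp (List.isPrefixOf_iff_prefix.mpr hh))]
        simp

theorem pv_replace_eq (old new t : List Char) (h0 : old ≠ []) :
    PySem.Chars.replace t old new = pvMyReplace old new t := by
  rw [PySem.Chars.replace, if_neg (by simpa using h0)]
  exact pv_replace_go_eq old new h0 t.length t [] le_rfl

theorem pv_myReplace_len (old new t : List Char) (h0 : old ≠ []) (h : old.length = new.length) :
    (pvMyReplace old new t).length = t.length := by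
  induction hn : t.length using Nat.strong_induction_on generalizing t with
  | _ n ih =>
  subst hn
  by_cases hp : old <+: t
  · rw [pv_myReplace_pos old new t h0 hp]
    have h1 : 0 < old.length := List.length_pos_iff.mpr h0
    have h2 := hp.length_le
    rw [List.length_append, ih (t.drop old.length).length (by simp; omega) _ rfl]
    simp; omega
  · cases t with
    | nil => simp [pv_myReplace_nil]
    | cons c t' =>
      rw [pv_myReplace_neg old new c t' hp]
      simp [ih t'.length (by simp) t' rfl]

theorem pv_myReplace_singleton (a b : Char) (t : List Char) :
    pvMyReplace [a] [b] t = t.map (fun c => if c = a then b else c) := by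
  induction t with
  | nil => simp [pv_myReplace_nil]
  | cons c t ih =>
    by_cases hc : c = a
    · subst hc
      rw [pv_myReplace_pos [c] [b] (c :: t) (by simp) (by simp)]
      simp [ih]
    · rw [pv_myReplace_neg [a] [b] c t (by simp [List.cons_prefix_cons]; exact fun h => hc h.symm)]
      simp [ih, hc]

theorem pv_myReplace_split (old new t : List Char) (k : ℕ) (h0 : old ≠ [])
    (h : ∀ j < k, ¬ old <+: t.drop j) :
    pvMyReplace old new t = t.take k ++ pvMyReplace old new (t.drop k) := by
  induction k generalizing t with
  | zero => simp
  | succ m ih =>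
    cases t with
    | nil => simp [pv_myReplace_nil]
    | cons c t' =>
      rw [pv_myReplace_neg old new c t' (by simpa using h 0 (by omega))]
      simp only [List.take_succ_cons, List.drop_succ_cons, List.cons_append]
      rw [ih t' (fun j hj => by simpa using h (j+1) (by omega))]

theorem pv_myReplace_mem (old new t : List Char) (c : Char) (h0 : old ≠ []) (hc : c ∈ pvMyReplace old new t) :
    c ∈ t ∨ c ∈ new := by
  induction hn : t.length using Nat.strong_induction_on generalizing t with
  | _ n ih =>
  subst hn
  by_cases hp : old <+: t
  · rw [pv_myReplace_pos old new t h0 hp] at hc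
    rcases List.mem_append.mp hc with h | h
    · exact Or.inr h
    · have h1 : 0 < old.length := List.length_pos_iff.mpr h0
      have h2 := hp.length_le
      rcases ih (t.drop old.length).length (by simp; omega) _ h rfl with h | h
      · exact Or.inl (List.mem_of_mem_drop h)
      · exact Or.inr h
  · cases t with
    | nil => rw [pv_myReplace_nil] at hc; cases hc
    | cons d t' =>
      rw [pv_myReplace_neg old new d t' hp] at hc
      rcases List.mem_cons.mp hc with h | h
      · exact Or.inl (h ▸ List.mem_cons_self)
      · rcases ih t'.length (by simp) t' h rfl with h | h
        · exact Or.inl (List.mem_cons_of_mem _ h)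
        · exact Or.inr h

theorem pv_pair_prefix_iff (x y : Char) (l : List Char) :
    [x, y] <+: l ↔ l[0]? = some x ∧ l[1]? = some y := by
  cases l with
  | nil => simp
  | cons a m =>
    cases m with
    | nil => simp [List.cons_prefix_cons]
    | cons b r => simp [List.cons_prefix_cons, eq_comm]

theorem pv_pair_prefix_drop (x y : Char) (l : List Char) (j : ℕ) :
    [x, y] <+: l.drop j ↔ l[j]? = some x ∧ l[j + 1]? = some y := by
  rw [pv_pair_prefix_iff]
  simp [List.getElem?_drop]

def pvTerms : List Char := ['.', '!', '?']

theorem pv_step_term (st : List (List String) × List String × List Char × Bool × Bool)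
    (c : Char) (h : c ∈ pvTerms) : pvBStep st c = pvBStep st '.' := by
  obtain ⟨res, wd, buf, ct, ab⟩ := st
  simp only [pvTerms, List.mem_cons, List.not_mem_nil, or_false] at h
  rcases h with rfl | rfl | rfl <;> rfl

theorem pv_step_after_term (st : List (List String) × List String × List Char × Bool × Bool) :
    pvBStep (pvBStep st '.') '.' = pvBStep st '.' ∧ pvBStep (pvBStep st '.') ' ' = pvBStep st '.' := by
  obtain ⟨res, wd, buf, ct, ab⟩ := st
  cases ct <;> simp [pvBStep]

theorem pv_run_replace_pair (a : Char) (ha : a ∈ pvTerms) :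
    ∀ (t : List Char) (st : List (List String) × List String × List Char × Bool × Bool),
      (pvMyReplace [a, ' '] ['.', '.'] t).foldl pvBStep st = t.foldl pvBStep st := by
  intro t
  induction hn : t.length using Nat.strong_induction_on generalizing t with
  | _ n ih =>
  subst hn
  intro st
  by_cases hp : [a, ' '] <+: t
  · obtain ⟨t₂, rfl⟩ := hp
    rw [pv_myReplace_pos [a, ' '] ['.', '.'] _ (by simp) ⟨t₂, rfl⟩]
    simp only [List.cons_append, List.nil_append, List.length_cons, List.drop_succ_cons,
      List.length_nil, List.drop_zero, List.foldl_cons]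
    rw [ih t₂.length (by simp) t₂ rfl]
    rw [pv_step_term st a ha, (pv_step_after_term st).1, (pv_step_after_term st).2]
  · cases t with
    | nil => rw [pv_myReplace_nil]
    | cons c t' =>
      rw [pv_myReplace_neg _ _ c t' hp]
      simp only [List.foldl_cons]
      exact ih t'.length (by simp) t' rfl _

theorem pv_run_replace_single (a : Char) (ha : a ∈ (['!', '?'] : List Char)) :
    ∀ (t : List Char) (st : List (List String) × List String × List Char × Bool × Bool),
      (pvMyReplace [a] ['.'] t).foldl pvBStep st = t.foldl pvBStep st := by
  intro t
  induction t with
  | nil => intro st; rw [pv_myReplace_nil]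
  | cons c t ih =>
    intro st
    rw [pv_myReplace_singleton]
    simp only [List.map_cons, List.foldl_cons]
    by_cases hc : c = a
    · subst hc
      rw [if_pos rfl, ← pv_myReplace_singleton, ih]
      have hct : c ∈ pvTerms := by
        simp only [List.mem_cons, List.not_mem_nil, or_false] at ha
        rcases ha with rfl | rfl <;> simp [pvTerms]
      rw [pv_step_term st c hct]
    · rw [if_neg hc, ← pv_myReplace_singleton, ih]

theorem pv_run_sentStep (t : List Char) (i : Int)
    (st : List (List String) × List String × List Char × Bool × Bool) :
    (pvSentStep t i).foldl pvBStep st = t.foldl pvBStep st := by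
  rw [pvSentStep]
  split_ifs with h1 h2
  · obtain ⟨-, hm⟩ := h1
    rw [pv_replace_eq _ _ _ (by simp)]
    simp only [List.mem_cons, List.not_mem_nil, or_false] at hm
    rcases hm with hm | hm | hm <;>
      (rw [List.cons.injEq, List.cons.injEq] at hm) <;>
      (obtain ⟨h1, h2, -⟩ := hm) <;> rw [h1, h2] <;>
      exact pv_run_replace_pair _ (by simp [pvTerms]) t st
  · rw [pv_replace_eq _ _ _ (by simp)]
    exact pv_run_replace_single _ h2 t st
  · rfl

theorem pv_run_loop (is : List Int) :
    ∀ (t : List Char) (st : List (List String) × List String × List Char × Bool × Bool),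
      (is.foldl pvSentStep t).foldl pvBStep st = t.foldl pvBStep st := by
  induction is with
  | nil => intro t st; rfl
  | cons i is ih =>
    intro t st
    simp only [List.foldl_cons]
    rw [ih (pvSentStep t i) st, pv_run_sentStep]

theorem pv_sentStep_mem (t : List Char) (i : Int) (c : Char) (hc : c ∈ pvSentStep t i) :
    c ∈ t ∨ c = '.' := by
  rw [pvSentStep] at hc
  split_ifs at hc with h1 h2
  · rw [pv_replace_eq _ _ _ (by simp)] at hc
    rcases pv_myReplace_mem _ _ _ _ (by simp) hc with h | h
    · exact Or.inl h
    · simp at h; rcases h with rfl | rfl <;> exact Or.inr rfl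
  · rw [pv_replace_eq _ _ _ (by simp)] at hc
    rcases pv_myReplace_mem _ _ _ _ (by simp) hc with h | h
    · exact Or.inl h
    · simp at h; exact Or.inr h
  · exact Or.inl hc

theorem pv_loop_mem (is : List Int) :
    ∀ (t : List Char) (c : Char), c ∈ is.foldl pvSentStep t → c ∈ t ∨ c = '.' := by
  induction is with
  | nil => intro t c h; exact Or.inl h
  | cons i is ih =>
    intro t c h
    rcases ih (pvSentStep t i) c h with h | h
    · exact pv_sentStep_mem t i c h
    · exact Or.inr h

def pvNoBang (l : List Char) : Prop := ∀ c ∈ l, c ≠ '!' ∧ c ≠ '?'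
def pvNoDS (l : List Char) : Prop := ∀ j : ℕ, ¬(l[j]? = some '.' ∧ l[j + 1]? = some ' ')
def pvInv (k : ℕ) (t : List Char) : Prop :=
  (∀ j < k, ∀ x, t[j]? = some x → x ≠ '!' ∧ x ≠ '?') ∧
  (∀ j : ℕ, j + 1 ≤ k → ¬(t[j]? = some '.' ∧ t[j + 1]? = some ' '))

theorem pv_step_pres (t : List Char) (n k : ℕ) (hlen : t.length = n) (hk : k < n)
    (hinv : pvInv k t) :
    (pvSentStep t (k : Int)).length = n ∧ pvInv (k + 1) (pvSentStep t (k : Int)) := by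
  obtain ⟨inv1, inv2⟩ := hinv
  have hkl : k < t.length := by omega
  have hget : PySem.List.pyGetD t (k : Int) ' ' = t[k] := by
    rw [PySem.List.pyGetD_natCast, List.getD_eq_getElem t ' ' hkl]
  rw [pvSentStep]
  split_ifs with h1 h2
  · -- pair replace
    obtain ⟨hlt, hmem⟩ := h1
    have hk1 : k + 1 < t.length := by
      rw [PySem.List.len_eq] at hlt
      omega
    have hget1 : PySem.List.pyGetD t ((k : Int) + 1) ' ' = t[k + 1] := by
      rw [show ((k : Int) + 1) = ((k + 1 : ℕ) : Int) by push_cast; ring,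
        PySem.List.pyGetD_natCast, List.getD_eq_getElem t ' ' hk1]
    rw [hget, hget1] at hmem ⊢
    simp only [List.mem_cons, List.not_mem_nil, or_false, List.cons.injEq, and_true] at hmem
    obtain ⟨ha, hsp⟩ : (t[k] = '.' ∨ t[k] = '!' ∨ t[k] = '?') ∧ t[k + 1] = ' ' := by tauto
    rw [hsp]
    have hno : ∀ j < k, ¬ [t[k], ' '] <+: t.drop j := by
      intro j hj hpre
      rw [pv_pair_prefix_drop] at hpre
      obtain ⟨hx, hy⟩ := hpre
      rcases ha with h | h | h
      · exact inv2 j (by omega) ⟨h ▸ hx, hy⟩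
      · exact (inv1 j hj t[k] hx).1 h
      · exact (inv1 j hj t[k] hx).2 h
    rw [pv_replace_eq _ _ _ (by simp)]
    rw [pv_myReplace_split [t[k], ' '] ['.', '.'] t k (by simp) hno]
    have hdropk : t.drop k = t[k] :: ' ' :: t.drop (k + 2) := by
      rw [List.drop_eq_getElem_cons hkl, List.drop_eq_getElem_cons hk1, hsp]
    rw [hdropk, pv_myReplace_pos [t[k], ' '] ['.', '.'] _ (by simp) (by simp [List.cons_prefix_cons])]
    simp only [List.length_cons, List.length_nil, List.drop_succ_cons, List.drop_zero]
    have hrlen : (pvMyReplace [t[k], ' '] ['.', '.'] (t.drop (k + 2))).length = t.length - (k + 2) := by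
      rw [pv_myReplace_len _ _ _ (by simp) (by simp)]
      simp
    have htklen : (t.take k).length = k := by simp; omega
    refine ⟨?_, ?_, ?_⟩
    · simp only [List.length_append, htklen, List.length_cons, List.length_nil, hrlen]
      omega
    · intro j hj x hx
      by_cases hjk : j < k
      · rw [List.getElem?_append_left (by omega : j < (t.take k).length),
          List.getElem?_take_of_lt hjk] at hx
        exact inv1 j hjk x hx
      · have hjk' : j = k := by omega
        subst hjk'
        rw [List.getElem?_append_right (by omega), htklen, Nat.sub_self] at hx
        simp only [List.cons_append, List.nil_append, List.getElem?_cons_zero,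
          Option.some.injEq] at hx
        subst hx
        exact ⟨by decide, by decide⟩
    · intro j hj hds
      obtain ⟨hd, hs⟩ := hds
      by_cases hc1 : j + 1 < k
      · rw [List.getElem?_append_left (by omega : j < (t.take k).length),
          List.getElem?_take_of_lt (by omega)] at hd
        rw [List.getElem?_append_left (by omega : j + 1 < (t.take k).length),
          List.getElem?_take_of_lt (by omega)] at hs
        exact inv2 j (by omega) ⟨hd, hs⟩
      · by_cases hc2 : j + 1 = k
        · rw [List.getElem?_append_right (by omega), htklen, hc2, Nat.sub_self] at hs
          simp at hs
        · have hje : j = k := by omega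
          subst hje
          rw [List.getElem?_append_right (by omega), htklen, Nat.add_sub_cancel_left] at hs
          simp at hs
  · -- single-char replace
    rw [hget] at h2 ⊢
    have hnot : ∀ _ : k + 1 < t.length, t[k + 1] ≠ ' ' := by
      intro hkk hsp
      apply h1
      refine ⟨by rw [PySem.List.len_eq]; omega, ?_⟩
      have hget1 : PySem.List.pyGetD t ((k : Int) + 1) ' ' = t[k + 1] := by
        rw [show ((k : Int) + 1) = ((k + 1 : ℕ) : Int) by push_cast; ring,
          PySem.List.pyGetD_natCast, List.getD_eq_getElem t ' ' hkk]
      rw [hget, hget1, hsp]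
      simp only [List.mem_cons, List.not_mem_nil, or_false] at h2 ⊢
      rcases h2 with h | h <;> simp [h]
    rw [pv_replace_eq _ _ _ (by simp), pv_myReplace_singleton]
    refine ⟨by simp; omega, ?_, ?_⟩
    · intro j hj x hx
      rw [List.getElem?_map] at hx
      cases hg : t[j]? with
      | none => rw [hg] at hx; simp at hx
      | some y =>
        rw [hg] at hx
        simp only [Option.map_some, Option.some.injEq] at hx
        subst hx
        by_cases hya : y = t[k]
        · simp only [if_pos hya]
          exact ⟨by decide, by decide⟩
        · simp only [if_neg hya]
          by_cases hjk : j < k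
          · exact inv1 j hjk y hg
          · have hje : j = k := by omega
            subst hje
            rw [List.getElem?_eq_getElem hkl] at hg
            simp only [Option.some.injEq] at hg
            exact absurd hg.symm hya
    · intro j hj hds
      obtain ⟨hd, hs⟩ := hds
      rw [List.getElem?_map] at hd hs
      cases hgj : t[j]? with
      | none => rw [hgj] at hd; simp at hd
      | some y =>
      cases hgj1 : t[j + 1]? with
      | none => rw [hgj1] at hs; simp at hs
      | some z =>
      rw [hgj] at hd
      rw [hgj1] at hs
      simp only [Option.map_some, Option.some.injEq] at hd hs
      have hz : z = ' ' := by
        by_cases hza : z = t[k]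
        · rw [if_pos hza] at hs; exact absurd hs (by decide)
        · rwa [if_neg hza] at hs
      by_cases hjk : j + 1 ≤ k
      · by_cases hya : y = t[k]
        · have hy1 := inv1 j (by omega) y hgj
          simp only [List.mem_cons, List.not_mem_nil, or_false] at h2
          rcases h2 with h | h
          · exact hy1.1 (hya.trans h)
          · exact hy1.2 (hya.trans h)
        · rw [if_neg hya] at hd
          exact inv2 j hjk ⟨hd ▸ hgj, hz ▸ hgj1⟩
      · have hje : j = k := by omega
        subst hje
        obtain ⟨hlt2, hz'⟩ := List.getElem?_eq_some_iff.mp hgj1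
        exact hnot hlt2 (by rw [hz', hz])
  · -- unchanged
    refine ⟨hlen, ?_, ?_⟩
    · intro j hj x hx
      by_cases hjk : j < k
      · exact inv1 j hjk x hx
      · have hje : j = k := by omega
        subst hje
        rw [List.getElem?_eq_getElem hkl] at hx
        simp only [Option.some.injEq] at hx
        subst hx
        rw [hget] at h2
        simp only [List.mem_cons, List.not_mem_nil, or_false, not_or] at h2
        exact ⟨h2.1, h2.2⟩
    · intro j hj hds
      obtain ⟨hd, hs⟩ := hds
      by_cases hjk : j + 1 ≤ k
      · exact inv2 j hjk ⟨hd, hs⟩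
      · have hje : j = k := by omega
        subst hje
        obtain ⟨hlt2, hz'⟩ := List.getElem?_eq_some_iff.mp hs
        obtain ⟨hltk, hd'⟩ := List.getElem?_eq_some_iff.mp hd
        apply h1
        refine ⟨by rw [PySem.List.len_eq]; omega, ?_⟩
        have hget1 : PySem.List.pyGetD t ((j : Int) + 1) ' ' = t[j + 1] := by
          rw [show ((j : Int) + 1) = ((j + 1 : ℕ) : Int) by push_cast; ring,
            PySem.List.pyGetD_natCast, List.getD_eq_getElem t ' ' hlt2]
        rw [hget, hget1, hd', hz']
        simp

theorem pv_loop_inv (n : ℕ) :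
    ∀ (m i : ℕ) (t : List Char), t.length = n → i + m ≤ n → pvInv i t →
      ((List.range' i m).foldl (fun t (k : ℕ) => pvSentStep t (k : Int)) t).length = n ∧
      pvInv (i + m) ((List.range' i m).foldl (fun t (k : ℕ) => pvSentStep t (k : Int)) t) := by
  intro m
  induction m with
  | zero => intro i t h1 h2 h3; simpa using ⟨h1, h3⟩
  | succ m ih =>
    intro i t h1 h2 h3
    rw [List.range'_succ]
    simp only [List.foldl_cons]
    obtain ⟨hl, hi⟩ := pv_step_pres t n i h1 (by omega) h3
    have := ih (i + 1) (pvSentStep t (i : Int)) hl (by omega) hi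
    rw [show i + 1 + m = i + (m + 1) by omega] at this
    simpa using this

theorem pv_loop_clean (t : List Char) :
    pvNoBang ((PySem.List.pyRange 0 (PySem.List.len t) 1).foldl pvSentStep t) ∧
    pvNoDS ((PySem.List.pyRange 0 (PySem.List.len t) 1).foldl pvSentStep t) := by
  rw [PySem.List.len_eq, PySem.List.pyRange_zero_natCast, List.foldl_map, List.range_eq_range']
  obtain ⟨hlen, hinv1, hinv2⟩ :=
    pv_loop_inv t.length t.length 0 t rfl (by omega) ⟨by omega, by omega⟩
  set t2 := (List.range' 0 t.length).foldl (fun t (k : ℕ) => pvSentStep t (k : Int)) t with ht2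
  constructor
  · intro c hc
    obtain ⟨j, hjl, hje⟩ := List.getElem_of_mem hc
    exact hinv1 j (by omega) c (by rw [List.getElem?_eq_getElem hjl, hje])
  · intro j hds
    obtain ⟨hd, hs⟩ := hds
    obtain ⟨hlt2, -⟩ := List.getElem?_eq_some_iff.mp hs
    exact hinv2 j (by omega) ⟨hd, hs⟩

def pvPieces : List Char → List Char × List (List Char)
  | [] => ([], [])
  | c :: l => if c = '.' then ([], (pvPieces l).1 :: (pvPieces l).2)
              else (c :: (pvPieces l).1, (pvPieces l).2)

theorem pv_splitOn_go_eq :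
    ∀ (fuel : ℕ) (l cur : List Char) (accs : List (List Char)), l.length < fuel →
      PySem.Chars.splitOn.go ['.'] fuel l cur accs =
        accs.reverse ++ ((cur.reverse ++ (pvPieces l).1) :: (pvPieces l).2) := by
  intro fuel
  induction fuel with
  | zero => intro l cur accs h; omega
  | succ n ih =>
    intro l cur accs h
    cases l with
    | nil => simp [PySem.Chars.splitOn.go, pvPieces]
    | cons c t =>
      rw [PySem.Chars.splitOn.go]
      by_cases hc : c = '.'
      · subst hc
        rw [if_pos (by simp [List.isPrefixOf])]
        simp only [List.length_cons, List.length_nil, List.drop_succ_cons, List.drop_zero]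
        rw [ih t [] (List.reverse cur :: accs) (by simp at h ⊢; omega)]
        simp [pvPieces]
      · rw [if_neg (by simp [List.isPrefixOf]; exact fun hh => hc hh.symm)]
        rw [ih t (c :: cur) accs (by simp at h ⊢; omega)]
        simp [pvPieces, hc]

theorem pv_splitOn_eq (t : List Char) :
    PySem.Chars.splitOn t ['.'] = (pvPieces t).1 :: (pvPieces t).2 := by
  rw [PySem.Chars.splitOn, pv_splitOn_go_eq (t.length + 1) t [] [] (by omega)]
  simp

theorem pv_split₀_go_acc :
    ∀ (l cur : List Char) (acc : List (List Char)),
      PySem.Chars.split₀.go l cur acc = acc.reverse ++ PySem.Chars.split₀.go l cur [] := by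
  intro l
  induction l with
  | nil =>
    intro cur acc
    by_cases h : cur.isEmpty <;> simp [PySem.Chars.split₀.go, h]
  | cons c t ih =>
    intro cur acc
    rw [PySem.Chars.split₀.go, PySem.Chars.split₀.go]
    by_cases hs : PySem.Chars.isspace c
    · rw [if_pos hs, if_pos hs]
      by_cases he : cur.isEmpty
      · rw [if_pos he, if_pos he, ih]
      · rw [if_neg he, if_neg he, ih [] (cur.reverse :: acc), ih [] [cur.reverse]]
        simp
    · rw [if_neg hs, if_neg hs, ih]

theorem pv_split₀_go_word (w : List Char) :
    ∀ (rest cur : List Char) (acc : List (List Char)),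
      (∀ c ∈ w, PySem.Chars.isspace c = false) →
      PySem.Chars.split₀.go (w ++ rest) cur acc = PySem.Chars.split₀.go rest (w.reverse ++ cur) acc := by
  induction w with
  | nil => intro rest cur acc _; simp
  | cons c t ih =>
    intro rest cur acc hw
    rw [List.cons_append, PySem.Chars.split₀.go, if_neg (by simp [hw c List.mem_cons_self])]
    rw [ih rest (c :: cur) acc (fun d hd => hw d (List.mem_cons_of_mem _ hd))]
    simp

theorem pv_split₀_nil : PySem.Chars.split₀ [] = [] := by
  simp [PySem.Chars.split₀, PySem.Chars.split₀.go]

theorem pv_split₀_nonws (w : List Char) (hw : ∀ c ∈ w, PySem.Chars.isspace c = false) (h : w ≠ []) :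
    PySem.Chars.split₀ w = [w] := by
  have h1 := pv_split₀_go_word w [] [] [] hw
  rw [List.append_nil, List.append_nil] at h1
  rw [PySem.Chars.split₀, h1, PySem.Chars.split₀.go]
  simp [List.isEmpty_iff, h]

theorem pv_split₀_break (w : List Char) (b : Char) (v : List Char)
    (hw : ∀ c ∈ w, PySem.Chars.isspace c = false) (hb : PySem.Chars.isspace b = true) :
    PySem.Chars.split₀ (w ++ b :: v) = (if w.isEmpty then [] else [w]) ++ PySem.Chars.split₀ v := by
  rw [PySem.Chars.split₀, pv_split₀_go_word w (b :: v) [] [] hw]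
  simp only [List.append_nil]
  rw [PySem.Chars.split₀.go, if_pos hb]
  by_cases he : w.isEmpty
  · have hw0 : w = [] := List.isEmpty_iff.mp he
    subst hw0
    simp [PySem.Chars.split₀, he]
  · rw [if_neg (by simpa using he)]
    simp only [List.reverse_reverse]
    rw [pv_split₀_go_acc v [] [w]]
    simp [PySem.Chars.split₀, he]

theorem pv_split₀_no_nil (s : List Char) : ∀ p ∈ PySem.Chars.split₀ s, p ≠ [] := by
  have main : ∀ (l cur : List Char) (acc : List (List Char)),
      (∀ p ∈ acc, p ≠ []) → ∀ p ∈ PySem.Chars.split₀.go l cur acc, p ≠ [] := by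
    intro l
    induction l with
    | nil =>
      intro cur acc hacc p hp
      rw [PySem.Chars.split₀.go] at hp
      by_cases he : cur.isEmpty
      · rw [if_pos he] at hp
        exact hacc p (by simpa using hp)
      · rw [if_neg he] at hp
        simp at hp
        rcases hp with hp | rfl
        · exact hacc p hp
        · simpa [List.isEmpty_iff] using he
    | cons c t ih =>
      intro cur acc hacc p hp
      rw [PySem.Chars.split₀.go] at hp
      by_cases hs : PySem.Chars.isspace c
      · rw [if_pos hs] at hp
        by_cases he : cur.isEmpty
        · rw [if_pos he] at hp
          exact ih [] acc hacc p hp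
        · rw [if_neg he] at hp
          refine ih [] (cur.reverse :: acc) ?_ p hp
          intro q hq
          rcases List.mem_cons.mp hq with rfl | hq
          · simpa [List.isEmpty_iff] using he
          · exact hacc q hq
      · rw [if_neg hs] at hp
        exact ih (c :: cur) acc hacc p hp
  intro p hp
  exact main s [] [] (by simp) p hp

theorem pv_remove_getD {α : Type} [BEq α] (l : List α) (x : α) :
    (PySem.List.remove? l x).getD l = l.erase x := by
  rw [PySem.List.remove?, List.erase_eq_eraseIdx]
  cases h : List.idxOf? x l <;> simp [h]

theorem pv_filter_erase {α : Type} [BEq α] [LawfulBEq α] (x : α) :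
    ∀ (l : List α), (l.erase x).filter (fun c => !(c == x)) = l.filter (fun c => !(c == x)) := by
  intro l
  induction l with
  | nil => simp
  | cons c t ih =>
    rw [List.erase_cons]
    by_cases hc : c = x
    · subst hc; simp [ih]
    · simp only [beq_eq_false_iff_ne, ne_eq, hc, not_false_eq_true, if_neg, List.filter_cons]
      simp [hc, ih]

theorem pv_removeIter {α : Type} [BEq α] [LawfulBEq α] (x : α) :
    ∀ (n : ℕ) (l : List α), List.count x l = n →
      (List.range n).foldl (fun l (_ : ℕ) => ((PySem.List.remove? l x).getD l)) l =
        l.filter (fun c => !(c == x)) := by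
  intro n
  induction n with
  | zero =>
    intro l h
    simp only [List.range_zero, List.foldl_nil]
    rw [eq_comm, List.filter_eq_self]
    intro a ha
    simp only [Bool.not_eq_eq_eq_not, Bool.not_true, beq_eq_false_iff_ne]
    rintro rfl
    rw [List.count_eq_zero] at h
    exact h ha
  | succ m ih =>
    intro l h
    rw [List.range_succ_eq_map]
    simp only [List.foldl_cons, List.foldl_map]
    rw [pv_remove_getD]
    rw [ih (l.erase x) (by rw [List.count_erase_self]; omega)]
    exact pv_filter_erase x l

theorem pv_removeLoop_eq_filter {α : Type} [BEq α] [LawfulBEq α] (l : List α) (x : α) :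
    pvRemoveLoop l x = l.filter (fun c => !(c == x)) := by
  rw [pvRemoveLoop, PySem.List.count, PySem.List.pyRange_zero_natCast, List.foldl_map]
  exact pv_removeIter x (List.count x l) l rfl

def pvPuncts : List Char := [',', '-', ':', ';', '"', '\'', '\n', '\t']
def pvF (c : Char) : Char := if c ∈ pvPuncts then ' ' else c

theorem pv_dom_ok (c : Char) (h : pvDomChar c = true) :
    PySem.Chars.isspace c = true → c ∈ ([' ', '\t', '\n', '\r', '\x0b', '\x0c'] : List Char) := by
  intro hs
  rw [PySem.Chars.isspace] at hs
  rw [pvDomChar] at h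
  simp only [Bool.or_eq_true, Bool.and_eq_true, decide_eq_true_eq, beq_iff_eq] at hs h
  have hn : c.toNat = 32 ∨ c.toNat = 9 ∨ c.toNat = 10 ∨ c.toNat = 13 := by omega
  have hc := (Char.ofNat_toNat c).symm
  rcases hn with hn | hn | hn | hn <;> rw [hn] at hc <;> subst hc <;> decide
theorem pv_dom_lower (c : Char) (h : pvDomChar c = true) :
    pvDomChar (PySem.Chars.lowerChar c) = true := by
  rw [PySem.Chars.lowerChar]
  by_cases hu : PySem.Chars.isupper c = true
  · rw [if_pos hu]
    rw [PySem.Chars.isupper] at hu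
    simp only [Bool.and_eq_true, decide_eq_true_eq, Char.le_def] at hu
    obtain ⟨h1, h2⟩ := hu
    have h1' : 65 ≤ c.toNat := h1
    have h2' : c.toNat ≤ 90 := h2
    have hv : (c.toNat + 32).isValidChar := Or.inl (by omega)
    rw [pvDomChar]
    simp only [Char.toNat_ofNat, if_pos hv]
    simp only [Bool.or_eq_true, Bool.and_eq_true, decide_eq_true_eq, beq_iff_eq]
    omega
  · rw [if_neg hu]; exact h

theorem pv_punct_fold (iter : List Char) :
    ∀ (u : List Char),
      iter.foldl (fun cur ch =>
        if ch ∈ ([',', '-', ':', ';', '"', '\'', '\n', '\t'] : List Char) then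
          PySem.Chars.replace cur [ch] [' ']
        else cur) u =
      u.map (fun c => if c ∈ iter.filter (· ∈ pvPuncts) then ' ' else c) := by
  induction iter with
  | nil => intro u; simp
  | cons a iter ih =>
    intro u
    simp only [List.foldl_cons]
    by_cases hP : a ∈ pvPuncts
    · rw [if_pos (by simpa [pvPuncts] using hP)]
      rw [pv_replace_eq _ _ _ (by simp), pv_myReplace_singleton, ih, List.map_map]
      apply List.map_congr_left
      intro x _
      simp only [Function.comp_apply]
      by_cases hx : x = a
      · subst hx
        rw [if_pos rfl]
        rw [if_neg (by
          intro hsp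
          rcases List.mem_filter.mp hsp with ⟨-, hq⟩
          simp [pvPuncts] at hq)]
        simp [List.mem_filter, hP]
      · rw [if_neg hx]
        by_cases hm : x ∈ iter ∧ x ∈ pvPuncts
        · rw [if_pos (List.mem_filter.mpr ⟨hm.1, decide_eq_true hm.2⟩),
            if_pos (List.mem_filter.mpr ⟨List.mem_cons_of_mem _ hm.1, decide_eq_true hm.2⟩)]
        · rw [if_neg (fun hf => hm ⟨(List.mem_filter.mp hf).1, of_decide_eq_true (List.mem_filter.mp hf).2⟩),
            if_neg (fun hf => by
              rcases List.mem_filter.mp hf with ⟨hin, hq⟩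
              rcases List.mem_cons.mp hin with rfl | hin
              · exact hx rfl
              · exact hm ⟨hin, of_decide_eq_true hq⟩)]
    · rw [if_neg (by simpa [pvPuncts] using hP), ih,
        List.filter_cons_of_neg (by simpa using hP)]

theorem pv_punct_fold_self (s : List Char) :
    s.foldl (fun cur ch =>
      if ch ∈ ([',', '-', ':', ';', '"', '\'', '\n', '\t'] : List Char) then
        PySem.Chars.replace cur [ch] [' ']
      else cur) s = s.map pvF := by
  rw [pv_punct_fold]
  apply List.map_congr_left
  intro x hx
  rw [pvF]
  by_cases hp : x ∈ pvPuncts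
  · rw [if_pos (by simp [List.mem_filter, hx, hp]), if_pos hp]
  · rw [if_neg (by simp [List.mem_filter, hp]), if_neg hp]

def pvSeps : List Char := [' ', '\t', '\n', '\r', '\x0b', '\x0c', ',', '-', ':', ';', '"', '\'']
def pvWords (p : List Char) : List String := (PySem.Chars.split₀ (p.map pvF)).map String.ofList
def pvOK (l : List Char) : Prop :=
  ∀ c ∈ l, PySem.Chars.isspace c = true → c ∈ ([' ', '\t', '\n', '\r', '\x0b', '\x0c'] : List Char)
def pvFinish (st : List (List String) × List String × List Char × Bool × Bool) : List (List String) :=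
  match st with
  | (res, wd, buf, ct, _) =>
    if ct then res ++ [if buf.isEmpty then wd else wd ++ [String.ofList buf]] else res

theorem pv_puncts_seps (c : Char) (h : c ∈ pvPuncts) : c ∈ pvSeps := by
  simp only [pvPuncts, List.mem_cons, List.not_mem_nil, or_false] at h
  rcases h with rfl|rfl|rfl|rfl|rfl|rfl|rfl|rfl <;> decide

theorem pv_ws6_seps (c : Char) (h : c ∈ ([' ', '\t', '\n', '\r', '\x0b', '\x0c'] : List Char)) :
    c ∈ pvSeps := by
  simp only [List.mem_cons, List.not_mem_nil, or_false] at h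
  rcases h with rfl|rfl|rfl|rfl|rfl|rfl <;> decide

theorem pv_sep_ws (c : Char) (h : c ∈ pvSeps) : PySem.Chars.isspace (pvF c) = true := by
  simp only [pvSeps, List.mem_cons, List.not_mem_nil, or_false] at h
  rcases h with rfl|rfl|rfl|rfl|rfl|rfl|rfl|rfl|rfl|rfl|rfl|rfl <;> decide

theorem pv_nonsep_ws (c : Char) (hok : PySem.Chars.isspace c = true →
      c ∈ ([' ', '\t', '\n', '\r', '\x0b', '\x0c'] : List Char))
    (h : c ∉ pvSeps) : PySem.Chars.isspace c = false := by
  by_cases hs : PySem.Chars.isspace c = true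
  · exact absurd (pv_ws6_seps c (hok hs)) h
  · simpa using hs

theorem pv_map_pvF_id (buf : List Char)
    (h : ∀ c ∈ buf, c ∉ pvSeps) : buf.map pvF = buf := by
  have hcong := List.map_congr_left (l := buf) (f := pvF) (g := id)
    (fun c hc => by rw [pvF, if_neg (fun hp => h c hc (pv_puncts_seps c hp))]; rfl)
  rw [hcong, List.map_id]

theorem pv_words_buf (buf : List Char)
    (h : ∀ c ∈ buf, c ∉ pvSeps ∧ c ∉ pvTerms ∧ PySem.Chars.isspace c = false) :
    pvWords buf = if buf.isEmpty then [] else [String.ofList buf] := by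
  rw [pvWords, pv_map_pvF_id buf (fun c hc => (h c hc).1)]
  cases hb : buf.isEmpty
  · rw [pv_split₀_nonws buf (fun c hc => (h c hc).2.2) (by simpa [List.isEmpty_iff] using hb)]
    simp
  · have : buf = [] := List.isEmpty_iff.mp hb
    subst this
    simp [pv_split₀_nil]

theorem pv_words_sep (buf : List Char) (c : Char) (p : List Char)
    (hbuf : ∀ d ∈ buf, d ∉ pvSeps ∧ d ∉ pvTerms ∧ PySem.Chars.isspace d = false)
    (hc : c ∈ pvSeps) :
    pvWords (buf ++ c :: p) =
      (if buf.isEmpty then [] else [String.ofList buf]) ++ pvWords p := by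
  rw [pvWords, pvWords, List.map_append, List.map_cons,
    pv_map_pvF_id buf (fun d hd => (hbuf d hd).1)]
  rw [pv_split₀_break buf (pvF c) (p.map pvF) (fun d hd => (hbuf d hd).2.2) (pv_sep_ws c hc)]
  cases hbe : buf.isEmpty <;> simp [pvWords]

theorem pv_noDS_cons (c : Char) (l : List Char) (h : pvNoDS (c :: l)) : pvNoDS l := by
  intro j hds
  exact h (j + 1) (by simpa using hds)

theorem pv_noDS_head (l : List Char) (h : pvNoDS ('.' :: l)) :
    ∀ x, l.head? = some x → x ≠ ' ' := by
  intro x hx hsp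
  subst hsp
  exact h 0 ⟨rfl, by simpa [List.head?_eq_getElem?] using hx⟩

theorem pv_main (l : List Char) :
    ∀ (res : List (List String)) (wd : List String) (buf : List Char) (ct ab : Bool),
      pvOK l → pvNoDS l → pvNoBang l →
      (∀ c ∈ buf, c ∉ pvSeps ∧ c ∉ pvTerms ∧ PySem.Chars.isspace c = false) →
      (buf ≠ [] → ct = true) → (wd ≠ [] → ct = true) →
      (ab = true → ∀ x, l.head? = some x → x ≠ ' ') →
      pvFinish (l.foldl pvBStep (res, wd, buf, ct, ab)) =
        res ++ (if ct = true ∨ (pvPieces l).1 ≠ [] then [wd ++ pvWords (buf ++ (pvPieces l).1)] else [])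
            ++ ((pvPieces l).2.filter (· ≠ [])).map pvWords := by
  induction l with
  | nil =>
    intro res wd buf ct ab _ _ _ hbuf hbufct hwdct _
    cases ct
    · have hb : buf = [] := by
        by_contra hb
        exact absurd (hbufct hb) (by simp)
      subst hb
      simp [pvFinish, pvPieces]
    · simp only [List.foldl_nil, pvFinish, pvPieces, List.append_nil, ne_eq]
      rw [pv_words_buf buf hbuf]
      cases hbe : buf.isEmpty <;> simp [hbe]
  | cons c l ih =>
    intro res wd buf ct ab hok hds hnb hbuf hbufct hwdct hab
    simp only [List.foldl_cons]
    by_cases hterm : c ∈ (['.', '!', '?'] : List Char)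
    · -- terminator: c must be '.'
      have hc : c = '.' := by
        rcases List.mem_cons.mp hterm with rfl | h
        · rfl
        · rcases List.mem_cons.mp h with rfl | h
          · exact absurd rfl (hnb '!' List.mem_cons_self).1
          · rcases List.mem_cons.mp h with rfl | h
            · exact absurd rfl (hnb '?' List.mem_cons_self).2
            · simp at h
      subst hc
      have hstep : pvBStep (res, wd, buf, ct, ab) '.' =
          (if ct then res ++ [if buf.isEmpty then wd else wd ++ [String.ofList buf]] else res,
           if ct then [] else (if buf.isEmpty then wd else wd ++ [String.ofList buf]), [], false, true) := by
        rw [pvBStep]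
        simp
      rw [hstep]
      have hwd2 : (if ct then [] else (if buf.isEmpty then wd else wd ++ [String.ofList buf])) = ([] : List String) := by
        cases ct
        · have hb : buf = [] := by
            by_contra hb
            exact absurd (hbufct hb) (by simp)
          have hw : wd = [] := by
            by_contra hw
            exact absurd (hwdct hw) (by simp)
          subst hb; subst hw
          simp
        · simp
      rw [hwd2]
      rw [ih _ [] [] false true (fun d hd hs => hok d (List.mem_cons_of_mem _ hd) hs)
        (pv_noDS_cons '.' l hds) (fun d hd => hnb d (List.mem_cons_of_mem _ hd))
        (by simp) (by simp) (by simp) (fun _ => pv_noDS_head l hds)]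
      have hpieces : pvPieces ('.' :: l) = ([], (pvPieces l).1 :: (pvPieces l).2) := by
        simp [pvPieces]
      rw [hpieces]
      rw [List.filter_cons]
      cases ct
      · have hb : buf = [] := by
          by_contra hb
          exact absurd (hbufct hb) (by simp)
        subst hb
        simp only [if_neg (by simp : ¬(false = true)), Bool.false_eq_true, false_or,
          List.nil_append]
        by_cases hp : (pvPieces l).1 = []
        · simp [hp]
        · simp [hp]
      · simp only [if_pos rfl, if_pos (Or.inl rfl)]
        rw [List.append_nil, pv_words_buf buf hbuf]
        by_cases hp : (pvPieces l).1 = []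
        · cases hbe : buf.isEmpty <;> simp [hp, hbe]
        · cases hbe : buf.isEmpty <;> simp [hp, hbe]
    · by_cases hsep : c ∈ pvSeps
      · -- separator
        have hcnsp : ¬(c = ' ' ∧ ab = true) := by
          rintro ⟨rfl, hab'⟩
          exact hab hab' ' ' (by simp) rfl
        have hstep : pvBStep (res, wd, buf, ct, ab) c =
            (res, if buf.isEmpty then wd else wd ++ [String.ofList buf], [], true, false) := by
          rw [pvBStep]
          rw [if_neg (by simpa using hterm), if_neg hcnsp, if_pos (by simpa [pvSeps] using hsep)]
        rw [hstep]
        rw [ih _ _ [] true false (fun d hd hs => hok d (List.mem_cons_of_mem _ hd) hs)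
          (pv_noDS_cons c l hds) (fun d hd => hnb d (List.mem_cons_of_mem _ hd))
          (by simp) (by simp) (by simp) (by simp)]
        have hcdot : c ≠ '.' := by rintro rfl; exact hterm (by decide)
        have hpieces : pvPieces (c :: l) = (c :: (pvPieces l).1, (pvPieces l).2) := by
          simp [pvPieces, hcdot]
        rw [hpieces]
        rw [if_pos (show (true = true) ∨ (pvPieces l).1 ≠ [] from Or.inl rfl)]
        rw [if_pos (show ct = true ∨ (c :: (pvPieces l).1) ≠ [] from Or.inr (by simp))]
        rw [pv_words_sep buf c (pvPieces l).1 hbuf hsep]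
        simp only [List.nil_append]
        cases hbe : buf.isEmpty <;> simp
      · -- word character
        have hcsp : c ≠ ' ' := by rintro rfl; exact hsep (by decide)
        have hstep : pvBStep (res, wd, buf, ct, ab) c =
            (res, wd, buf ++ [c], true, false) := by
          rw [pvBStep]
          rw [if_neg (by simpa using hterm), if_neg (by rintro ⟨rfl, -⟩; exact hcsp rfl),
            if_neg (by simpa [pvSeps] using hsep)]
        rw [hstep]
        have hcws : PySem.Chars.isspace c = false :=
          pv_nonsep_ws c (hok c List.mem_cons_self) hsep
        rw [ih _ _ (buf ++ [c]) true false (fun d hd hs => hok d (List.mem_cons_of_mem _ hd) hs)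
          (pv_noDS_cons c l hds) (fun d hd => hnb d (List.mem_cons_of_mem _ hd))
          (by
            intro d hd
            rcases List.mem_append.mp hd with hd | hd
            · exact hbuf d hd
            · have : d = c := by simpa using hd
              subst this
              exact ⟨hsep, hterm, hcws⟩)
          (by simp) (by simp) (by simp)]
        have hcdot : c ≠ '.' := by rintro rfl; exact hterm (by decide)
        have hpieces : pvPieces (c :: l) = (c :: (pvPieces l).1, (pvPieces l).2) := by
          simp [pvPieces, hcdot]
        rw [hpieces]
        rw [if_pos (show (true = true) ∨ (pvPieces l).1 ≠ [] from Or.inl rfl)]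
        rw [if_pos (show ct = true ∨ (c :: (pvPieces l).1) ≠ [] from Or.inr (by simp))]
        simp [List.append_assoc]

theorem pv_alt_eq_finish (text : String) :
    get_word_breakdown_alt text =
      pvFinish ((PySem.Chars.lower text.toList).foldl pvBStep ([], [], [], false, false)) := by
  rw [get_word_breakdown_alt]
  rcases (PySem.Chars.lower text.toList).foldl pvBStep ([], [], [], false, false) with
    ⟨res, wd, buf, ct, ab⟩
  rfl

theorem pv_per_sentence (s : List Char) :
    pvRemoveLoop ((PySem.Chars.split₀ (s.foldl (fun cur ch =>
      if ch ∈ ([',', '-', ':', ';', '"', '\'', '\n', '\t'] : List Char) then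
        PySem.Chars.replace cur [ch] [' ']
      else cur) s)).map String.ofList) "" = pvWords s := by
  rw [pv_punct_fold_self, pv_removeLoop_eq_filter, pvWords]
  rw [List.filter_eq_self]
  intro p hp
  rcases List.mem_map.mp hp with ⟨q, hq, rfl⟩
  have hqne : q ≠ [] := pv_split₀_no_nil _ q hq
  simp only [Bool.not_eq_eq_eq_not, Bool.not_true, beq_eq_false_iff_ne, ne_eq]
  intro hmk
  have h2 := congrArg String.toList hmk
  rw [String.toList_ofList] at h2
  exact hqne h2

theorem pv_dom_ok_list (text : String) (hdom : pvDomStr text = true) :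
    pvOK (PySem.Chars.lower text.toList) := by
  intro c hc
  rw [PySem.Chars.lower] at hc
  rcases List.mem_map.mp hc with ⟨d, hd, rfl⟩
  have hdd : pvDomChar d = true := by
    rw [pvDomStr, List.all_eq_true] at hdom
    exact hdom d hd
  exact pv_dom_ok _ (pv_dom_lower d hdd)

theorem get_word_breakdown_eq (text : String) (hdom : pvDomStr text = true) :
    get_word_breakdown text = get_word_breakdown_alt text := by
  rw [get_word_breakdown, pv_alt_eq_finish]
  set t := PySem.Chars.lower text.toList with ht
  have hOKt : pvOK t := pv_dom_ok_list text hdom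
  obtain ⟨hnb, hds⟩ := pv_loop_clean t
  have hOK2 : pvOK ((PySem.List.pyRange 0 (PySem.List.len t) 1).foldl pvSentStep t) := by
    intro c hc hs
    rcases pv_loop_mem _ t c hc with h | rfl
    · exact hOKt c h hs
    · exact absurd hs (by decide)
  have hrun : ((PySem.List.pyRange 0 (PySem.List.len t) 1).foldl pvSentStep t).foldl pvBStep
      ([], [], [], false, false) = t.foldl pvBStep ([], [], [], false, false) :=
    pv_run_loop _ t _
  have hfold : (pvGetSentences t).foldl (fun acc s =>
        acc ++ [pvRemoveLoop ((PySem.Chars.split₀ (s.foldl (fun cur ch =>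
          if ch ∈ ([',', '-', ':', ';', '"', '\'', '\n', '\t'] : List Char) then
            PySem.Chars.replace cur [ch] [' ']
          else cur) s)).map String.ofList) ""]) [] =
      ([] : List (List String)) ++ (pvGetSentences t).map (fun s =>
        pvRemoveLoop ((PySem.Chars.split₀ (s.foldl (fun cur ch =>
          if ch ∈ ([',', '-', ':', ';', '"', '\'', '\n', '\t'] : List Char) then
            PySem.Chars.replace cur [ch] [' ']
          else cur) s)).map String.ofList) "") :=
    PySem.List.foldl_append_singleton_eq_map _ _ _
  rw [hfold, List.nil_append, List.map_congr_left (fun s _ => pv_per_sentence s)]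
  have hpred : (fun (c : List Char) => !(c == [])) = (fun c => decide (c ≠ [])) := by
    funext c
    cases h : c == [] <;> simp_all
  rw [pvGetSentences, pv_removeLoop_eq_filter, pv_splitOn_eq, hpred, List.filter_cons]
  rw [← hrun]
  rw [pv_main _ [] [] [] false false hOK2 hds hnb (by simp) (by simp) (by simp) (by simp)]
  split_ifs <;> simp_all [pvWords, pv_split₀_nil]

-- ===== VERDICT (by name: the statement is the Claim_ definition above) =====
theorem get_word_breakdown_spec : Claim_equal_get_word_breakdown := by
  intro text hdom
  exact get_word_breakdown_eq text hdom
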